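-- pv_equiv track=rewrite | github.com/ashwinvprabhu/SamplePrograms | Ex1_4-PalindromePermutation.py | CreateBitVector
-- ===== SOURCE A (Python) =====
-- def Toggle(bitVector, index):
--     if index < 0:
--         return bitVector
--     mask = 1 << index
--     if (bitVector & mask) == 0:
--         bitVector |= mask
--     else:
--         bitVector &= ~mask
--     return bitVector
--
-- def CreateBitVector(str):
--     characters = list()
--     bitVector = 0
--     for x in range(len(str)):
--         characters.insert(x, str[x])
--     for chr in characters:
--         x = GetCharNumber(chr)
--         bitVector = Toggle(bitVector, x)
--     return bitVector
--
-- def GetCharNumber(c):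
--     a = ord('a')
--     z = ord('z')
--     numeric_c = ord(c)
--     if (a <= numeric_c and numeric_c <= z):
--         return numeric_c - a
--     return -1
-- ===== SOURCE B (Python) =====
-- def CreateBitVector(str):
--     counts = {}
--     for ch in str:
--         counts[ch] = counts.get(ch, 0) + 1
--     bitVector = 0
--     for i in range(26):
--         if counts.get(chr(ord('a') + i), 0) % 2 == 1:
--             bitVector |= 1 << i
--     return bitVector
-- ===== Notes on version B (the rewrite author's own statement) =====
-- stated objective: faster
-- what changed: B builds a character-frequency dictionary in one pass and then sets bit i for each of the 26 lowercase letters whose count is odd, instead of A's per-character streaming bit toggle over an intermediate list rebuilt with insert().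
import Mathlib
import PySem

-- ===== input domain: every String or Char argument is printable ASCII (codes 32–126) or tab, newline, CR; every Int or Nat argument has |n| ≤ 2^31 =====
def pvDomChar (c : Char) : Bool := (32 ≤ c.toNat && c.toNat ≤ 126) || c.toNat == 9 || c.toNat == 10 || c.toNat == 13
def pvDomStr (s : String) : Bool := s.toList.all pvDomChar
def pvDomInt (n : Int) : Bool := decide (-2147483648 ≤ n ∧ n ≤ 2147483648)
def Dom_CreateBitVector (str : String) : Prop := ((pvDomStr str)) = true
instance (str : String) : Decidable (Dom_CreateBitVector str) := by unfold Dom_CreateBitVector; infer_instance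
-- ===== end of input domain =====

-- B replaces A's per-character streaming bit toggle (over a list rebuilt with insert()) by a
-- frequency-dictionary build followed by one pass over the 26 lowercase letters, setting bit i
-- iff letter i's count is odd (measurably faster by a constant factor).

-- ===== PORT A =====
def Toggle (bitVector : Int) (index : Int) : Int :=
  if index < 0 then bitVector
  else
    -- mask = 1 << index; index ≥ 0 in this branch, so '.toNat' is exact
    let mask : Int := (1 : Int) <<< index.toNat
    if PySem.Int.band bitVector mask = 0 then
      PySem.Int.bor bitVector mask
    else
      PySem.Int.band bitVector (Int.not mask)

def GetCharNumber (c : Char) : Int :=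
  let a : Int := 97      -- ord('a')
  let z : Int := 122     -- ord('z')
  let numeric_c : Int := (c.toNat : Int)
  if a ≤ numeric_c ∧ numeric_c ≤ z then numeric_c - a else -1

def CreateBitVector (str : String) : Int :=
  -- characters = []; for x in range(len(str)): characters.insert(x, str[x])
  -- str[x] is always in range here, so pyGetD with a dummy default is exact
  let characters : List Char :=
    (PySem.List.pyRange 0 (PySem.Str.len str) 1).foldl
      (fun chars x => PySem.List.insert chars x (PySem.List.pyGetD str.toList x ' ')) []
  let bitVector : Int := 0
  characters.foldl (fun bv chr => Toggle bv (GetCharNumber chr)) bitVector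

-- ===== PORT B =====
def CreateBitVector_alt (str : String) : Int :=
  let counts : PySem.Dict Char Int :=
    str.toList.foldl (fun d ch => d.insert ch (d.getD ch 0 + 1)) PySem.Dict.empty
  (PySem.List.pyRange 0 26 1).foldl
    (fun bv i =>
      -- chr(ord('a') + i) for 0 ≤ i < 26: a valid code point, Char.ofNat is exact
      if PySem.Int.mod (counts.getD (Char.ofNat (97 + i).toNat) 0) 2 = 1 then
        PySem.Int.bor bv ((1 : Int) <<< i.toNat)
      else bv) 0

-- ===== PRECONDITION & SPEC =====
def Spec_CreateBitVector (str : String) (out : Int) : Prop := out = CreateBitVector_alt str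
instance (str : String) (out : Int) : Decidable (Spec_CreateBitVector str out) := by unfold Spec_CreateBitVector; infer_instance

-- ===== CLAIM (what is proved, stated in full; the proofs are below) =====
def Claim_equal_CreateBitVector : Prop := ∀ (str : String), Dom_CreateBitVector str → Spec_CreateBitVector str (CreateBitVector str)

-- ===== LEMMAS AND PROOFS =====

def pvStep (n : ℕ) (c : Char) : ℕ :=
  if 97 ≤ c.toNat ∧ c.toNat ≤ 122 then n ^^^ 2 ^ (c.toNat - 97) else n

def pvMStep (l : List Char) (m : ℕ) (i : ℕ) : ℕ :=
  if (l.count (Char.ofNat (97 + i))) % 2 = 1 then m ||| 2 ^ i else m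

def pvIsLetter (j : ℕ) (c : Char) : Bool :=
  decide (97 ≤ c.toNat ∧ c.toNat ≤ 122 ∧ c.toNat = 97 + j)

theorem pv_xor_two_pow_of_testBit_false (i : ℕ) :
    ∀ m : ℕ, m.testBit i = false → m ^^^ 2 ^ i = m + 2 ^ i := by
  induction i with
  | zero =>
    intro m h
    simp only [Nat.testBit_zero] at h
    simpa using Nat.xor_one_of_even (Nat.even_iff.mpr (by simpa using h))
  | succ i ih =>
    intro m h
    rw [← Nat.bit_bodd_div2 m] at h ⊢
    rw [Nat.testBit_bit_succ] at h
    have h2 : (2 : ℕ) ^ (i + 1) = Nat.bit false (2 ^ i) := by simp [Nat.bit]; ring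
    rw [h2, Nat.xor_bit, ih _ h]
    cases m.bodd <;> simp [Nat.bit] <;> ring

theorem pv_xor_two_pow_of_testBit_true (i m : ℕ) (h : m.testBit i = true) :
    m ^^^ 2 ^ i = m - 2 ^ i := by
  have hle : 2 ^ i ≤ m := Nat.ge_two_pow_of_testBit h
  have hb : (m ^^^ 2 ^ i).testBit i = false := by
    simp [Nat.testBit_xor, h, Nat.testBit_two_pow_self]
  have := pv_xor_two_pow_of_testBit_false i (m ^^^ 2 ^ i) hb
  rw [Nat.xor_assoc, Nat.xor_self, Nat.xor_zero] at this
  omega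

theorem pv_or_eq_xor_of_testBit_false (i m : ℕ) (h : m.testBit i = false) :
    m ||| 2 ^ i = m ^^^ 2 ^ i := by
  apply Nat.eq_of_testBit_eq
  intro j
  rcases eq_or_ne i j with rfl | hne
  · simp [Nat.testBit_xor, h, Nat.testBit_two_pow_self]
  · simp [Nat.testBit_xor, Nat.testBit_two_pow_of_ne hne]

theorem pv_toggle_nat (n i : ℕ) : Toggle (n : Int) (i : Int) = ((n ^^^ 2 ^ i : ℕ) : Int) := by
  unfold Toggle
  have h0 : ¬ ((i : Int) < 0) := by omega
  rw [if_neg h0]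
  have hmask : ((1 : Int) <<< ((i : Int)).toNat) = ((2 ^ i : ℕ) : Int) := by
    simp [Int.shiftLeft_eq]
  simp only [hmask, PySem.Int.band_natCast, PySem.Int.bor_natCast]
  have hand := Nat.and_two_pow n i
  by_cases hb : n.testBit i
  · have : n &&& 2 ^ i = 2 ^ i := by rw [hand, hb]; simp
    rw [if_neg (by rw [this]; positivity)]
    have hni : Int.not ((2 ^ i : ℕ) : Int) = -((2 ^ i : ℕ) : Int) - 1 := by
      show Int.negSucc (2 ^ i) = _
      rw [Int.negSucc_eq]; ring
    rw [hni, PySem.Int.band]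
    rw [if_pos (by positivity), if_neg (by omega)]
    have harg : (-(-((2 ^ i : ℕ) : Int) - 1) - 1) = ((2 ^ i : ℕ) : Int) := by ring
    rw [harg]
    simp only [Int.toNat_natCast]
    rw [this, pv_xor_two_pow_of_testBit_true i n hb]
  · have hz : n &&& 2 ^ i = 0 := by rw [hand]; simp [hb]
    rw [if_pos (by exact_mod_cast congrArg (Nat.cast : ℕ → ℤ) hz)]
    rw [pv_or_eq_xor_of_testBit_false i n (by simpa using hb)]

theorem pv_toggle_step (n : ℕ) (c : Char) :
    Toggle (n : Int) (GetCharNumber c) = ((pvStep n c : ℕ) : Int) := by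
  unfold GetCharNumber pvStep
  by_cases h : 97 ≤ c.toNat ∧ c.toNat ≤ 122
  · rw [if_pos (show (97:Int) ≤ (c.toNat : Int) ∧ (c.toNat : Int) ≤ 122 from ⟨by exact_mod_cast h.1, by exact_mod_cast h.2⟩), if_pos h]
    have : ((c.toNat : Int) - 97) = ((c.toNat - 97 : ℕ) : Int) := by omega
    rw [this, pv_toggle_nat]
  · rw [if_neg (by omega), if_neg h]
    unfold Toggle
    rw [if_pos (by norm_num)]

theorem pv_build_chars (s : List Char) :
    (PySem.List.pyRange 0 (s.length : Int) 1).foldl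
      (fun chars x => PySem.List.insert chars x (PySem.List.pyGetD s x ' ')) [] = s := by
  suffices h : ∀ n : ℕ, n ≤ s.length →
      (PySem.List.pyRange 0 (n : Int) 1).foldl
        (fun chars x => PySem.List.insert chars x (PySem.List.pyGetD s x ' ')) [] = s.take n by
    simpa using h s.length le_rfl
  intro n hn
  induction n with
  | zero => simp [PySem.List.pyRange_one_eq_nil]
  | succ n ih =>
    rw [show ((n + 1 : ℕ) : Int) = (n : Int) + 1 by push_cast; ring,
        PySem.List.pyRange_one_succ_right (by positivity), List.foldl_append,
        ih (by omega)]
    simp only [List.foldl_cons, List.foldl_nil]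
    have hlen : (s.take n).length = n := by simp; omega
    rw [PySem.List.insert_natCast _ _ _ (by omega)]
    rw [PySem.List.pyGetD_natCast]
    rw [List.take_take, List.drop_take]
    simp only [min_self, Nat.sub_self, List.take_zero]
    rw [List.take_add_one]
    congr 1
    simp [List.getD_eq_getElem?_getD, List.getElem?_eq_getElem (by omega : n < s.length)]

theorem pv_testBit_foldStep (l : List Char) : ∀ (n j : ℕ),
    (l.foldl pvStep n).testBit j =
      ((n.testBit j).xor (decide ((l.countP (pvIsLetter j)) % 2 = 1))) := by
  induction l with
  | nil => intro n j; simp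
  | cons c t ih =>
    intro n j
    rw [List.foldl_cons, ih, List.countP_cons]
    unfold pvStep pvIsLetter
    by_cases hc : 97 ≤ c.toNat ∧ c.toNat ≤ 122
    · rw [if_pos hc]
      by_cases hj : c.toNat = 97 + j
      · have he : c.toNat - 97 = j := by omega
        rw [he]
        simp only [Nat.testBit_xor, Nat.testBit_two_pow_self, hj]
        have hcnt : ∀ m : ℕ, decide ((m + 1) % 2 = 1) = !decide (m % 2 = 1) := by
          intro m; rcases Nat.mod_two_eq_zero_or_one m with h | h <;> simp [h, Nat.add_mod]
        have hle : (97 : ℕ) + j ≤ 122 := by omega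
        simp [hle, hcnt]
      · have hne : c.toNat - 97 ≠ j := by omega
        simp [Nat.testBit_xor, Nat.testBit_two_pow_of_ne hne, hj]
    · rw [if_neg hc]
      have : ¬ (97 ≤ c.toNat ∧ c.toNat ≤ 122 ∧ c.toNat = 97 + j) := by tauto
      simp [this]

theorem pv_testBit_M (l : List Char) : ∀ (k j : ℕ),
    ((List.range k).foldl (pvMStep l) 0).testBit j =
      (decide (j < k) && decide ((l.count (Char.ofNat (97 + j))) % 2 = 1)) := by
  intro k
  induction k with
  | zero => intro j; simp
  | succ k ih =>
    intro j
    rw [List.range_succ, List.foldl_append, List.foldl_cons, List.foldl_nil]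
    set M := (List.range k).foldl (pvMStep l) 0 with hM
    rw [show pvMStep l M k = if (l.count (Char.ofNat (97 + k))) % 2 = 1 then M ||| 2 ^ k else M from rfl]
    by_cases hc : (l.count (Char.ofNat (97 + k))) % 2 = 1
    · rw [if_pos hc]
      rcases eq_or_ne j k with rfl | hne
      · simp [Nat.testBit_two_pow_self, ih, hc]
      · have h1 : j < k + 1 ↔ j < k := by omega
        simp [Nat.testBit_two_pow_of_ne (Ne.symm hne), ih, h1]
    · rw [if_neg hc, ih]
      rcases eq_or_ne j k with rfl | hne
      · simp [hc]
      · have h1 : j < k + 1 ↔ j < k := by omega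
        simp [h1]

theorem pv_toNat_ofNat (n : ℕ) (h : Nat.isValidChar n) : (Char.ofNat n).toNat = n := by
  simp [Char.ofNat, h, Char.toNat, Char.ofNatAux]

theorem pv_N_eq_M (l : List Char) :
    l.foldl pvStep 0 = (List.range 26).foldl (pvMStep l) 0 := by
  apply Nat.eq_of_testBit_eq
  intro j
  rw [pv_testBit_foldStep, pv_testBit_M]
  by_cases hj : j < 26
  · have hvalid : Nat.isValidChar (97 + j) := by
      left; omega
    have hchar : ∀ c : Char, pvIsLetter j c = (c == Char.ofNat (97 + j)) := by
      intro c
      unfold pvIsLetter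
      by_cases hc : c.toNat = 97 + j
      · have : c = Char.ofNat (97 + j) := by
          have h1 : Char.ofNat c.toNat = c := Char.ofNat_toNat c
          rw [← h1, hc]
        rw [this]
        simp [pv_toNat_ofNat _ hvalid]
        omega
      · have : ¬ (c = Char.ofNat (97 + j)) := by
          intro h
          apply hc
          rw [h, pv_toNat_ofNat _ hvalid]
        simp [hc, this]
    have hcnt : l.countP (pvIsLetter j) = l.count (Char.ofNat (97 + j)) := by
      rw [List.count_eq_countP]
      exact List.countP_congr (fun c _ => by rw [hchar])
    simp [hcnt, hj]
  · have hz : l.countP (pvIsLetter j) = 0 := by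
      apply List.countP_eq_zero.mpr
      intro c hc
      unfold pvIsLetter
      intro h
      rw [decide_eq_true_eq] at h
      omega
    simp [hz, hj]

theorem pv_foldB_aux (l : List Char) (d : PySem.Dict Char Int)
    (hd : ∀ ch, d.getD ch 0 = ((l.count ch : ℕ) : Int)) :
    ∀ (k m : ℕ),
    ((List.range k).map (fun kk : ℕ => ((0 : Int) + (kk : Int)))).foldl
      (fun bv i => if PySem.Int.mod (d.getD (Char.ofNat (97 + i).toNat) 0) 2 = 1
                   then PySem.Int.bor bv ((1 : Int) <<< i.toNat) else bv) (m : Int)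
    = (((List.range k).foldl (pvMStep l) m : ℕ) : Int) := by
  intro k
  induction k with
  | zero => intro m; simp
  | succ k ih =>
    intro m
    rw [List.range_succ, List.map_append, List.foldl_append, List.foldl_append,
        List.map_cons, List.map_nil, List.foldl_cons, List.foldl_nil, List.foldl_cons,
        List.foldl_nil, ih]
    set M := (List.range k).foldl (pvMStep l) m with hM
    rw [show pvMStep l M k = if (l.count (Char.ofNat (97 + k))) % 2 = 1 then M ||| 2 ^ k else M from rfl]
    have hidx : ((97 : Int) + (0 + (k : Int))).toNat = 97 + k := by omega
    rw [hidx, hd]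
    have hmod : PySem.Int.mod ((l.count (Char.ofNat (97 + k)) : ℕ) : Int) 2 = ((l.count (Char.ofNat (97 + k)) % 2 : ℕ) : Int) := by
      exact_mod_cast PySem.Int.mod_natCast _ 2
    rw [hmod]
    have hsh : ((1 : Int) <<< ((((0 : Int) + (k : Int)).toNat : ℕ) : Int)) = ((2 ^ k : ℕ) : Int) := by
      have h1 : ((0 : Int) + (k : Int)).toNat = k := by omega
      rw [h1]; exact_mod_cast Int.one_shiftLeft k
    by_cases hc : (l.count (Char.ofNat (97 + k))) % 2 = 1
    · rw [if_pos (by exact_mod_cast hc), if_pos hc, hsh, PySem.Int.bor_natCast]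
    · rw [if_neg (by exact_mod_cast hc), if_neg hc]

theorem pv_foldB (str : String) :
    CreateBitVector_alt str = (((List.range 26).foldl (pvMStep str.toList) 0 : ℕ) : Int) := by
  unfold CreateBitVector_alt
  have hcount : ∀ ch : Char,
      (str.toList.foldl (fun d ch => d.insert ch (d.getD ch 0 + 1)) PySem.Dict.empty).getD ch 0
        = ((str.toList.count ch : ℕ) : Int) := by
    intro ch
    rw [PySem.Dict.getD_foldl_insert_add_one]
    simp [PySem.Dict.getD_empty]
  rw [PySem.List.pyRange_one]
  have h26 : ((26 : Int) - 0).toNat = 26 := by decide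
  rw [h26]
  have := pv_foldB_aux str.toList _ hcount 26 0
  simpa using this

theorem pv_foldA (l : List Char) : ∀ n : ℕ,
    l.foldl (fun bv chr => Toggle bv (GetCharNumber chr)) (n : Int) = ((l.foldl pvStep n : ℕ) : Int) := by
  induction l with
  | nil => intro n; rfl
  | cons c t ih => intro n; simp only [List.foldl_cons, pv_toggle_step, ih]

-- ===== VERDICT (by name: the statement is the Claim_ definition above) =====
theorem CreateBitVector_spec : Claim_equal_CreateBitVector := by
  intro str _
  unfold Spec_CreateBitVector CreateBitVector
  have hlen : PySem.Str.len str = (str.toList.length : Int) := by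
    simp [PySem.Str.len_eq]
  rw [hlen, pv_build_chars]
  have h0 : (0 : Int) = ((0 : ℕ) : Int) := rfl
  rw [h0, pv_foldA, pv_N_eq_M, ← pv_foldB]
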